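-- pv_equiv track=rewrite | github.com/Nythan/Python-cours | ExercicePartie3/ex3_10.py | correspond
-- ===== SOURCE A (Python) =====
-- def est_inclus(motif:str,chaine:str) -> bool:
--     v=""
--     g = False
--     for i in range(len(chaine)-len(motif)+1):
--         for y in range(i, i + len(motif)):
--             v = v+chaine[y]
--         if v == motif:
--             g= True
--
--         else:
--             v = ""
--     return g
--
-- def correspond(motif:str, chaine:str, position:int) -> bool:
--     v = ""
--     g = False
--     if est_inclus(motif,chaine):
--         for i in range(position,position+len(motif)):
--             v = v+chaine[i]
--         if v == motif :
--             g = True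
--     return g
-- ===== SOURCE B (Python) =====
-- def correspond(motif: str, chaine: str, position: int) -> bool:
--     if motif not in chaine:
--         return False
--     return all(chaine[position + k] == motif[k] for k in range(len(motif)))
-- ===== Notes on version B (the rewrite author's own statement) =====
-- stated objective: faster
-- what changed: B replaces A's quadratic hand-rolled sliding-window scan (building each window string char by char) with the built-in substring test `motif in chaine` plus a single per-character comparison at `position`, with no string building.
import Mathlib
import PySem

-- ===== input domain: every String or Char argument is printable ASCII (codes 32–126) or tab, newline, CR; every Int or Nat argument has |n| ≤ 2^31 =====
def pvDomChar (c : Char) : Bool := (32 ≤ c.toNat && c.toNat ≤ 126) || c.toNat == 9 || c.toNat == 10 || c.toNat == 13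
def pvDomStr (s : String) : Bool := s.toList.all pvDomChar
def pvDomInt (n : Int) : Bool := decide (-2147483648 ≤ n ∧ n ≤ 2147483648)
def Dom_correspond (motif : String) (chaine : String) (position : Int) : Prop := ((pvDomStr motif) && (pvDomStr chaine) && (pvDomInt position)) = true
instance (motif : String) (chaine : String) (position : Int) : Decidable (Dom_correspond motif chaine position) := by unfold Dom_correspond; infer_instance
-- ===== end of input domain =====

-- B replaces A's quadratic hand-rolled sliding-window scan by the built-in substring test
-- plus a direct per-character check at `position` (objective: faster).

-- ===== PORT A =====
-- literal port of est_inclus: nested loops building v char by char (the indices read here are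
-- always in range, so `pyGetD` with a dummy default is exact)
def est_inclus (motif : String) (chaine : String) : Bool :=
  let m := motif.toList
  let c := chaine.toList
  let st := (PySem.List.pyRange 0 (PySem.List.len c - PySem.List.len m + 1) 1).foldl
    (fun (vg : List Char × Bool) i =>
      let v := (PySem.List.pyRange i (i + PySem.List.len m) 1).foldl
        (fun v y => v ++ [PySem.List.pyGetD c y ' ']) vg.1
      if v = m then (v, true) else ([], vg.2))
    ([], false)
  st.2

-- literal port of correspond: the loop state is `some v`; `none` marks the point where
-- Python raises IndexError (those inputs are excluded by Pre_correspond)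
def correspond (motif : String) (chaine : String) (position : Int) : Bool :=
  if est_inclus motif chaine then
    let v := (PySem.List.pyRange position (position + PySem.List.len motif.toList) 1).foldl
      (fun (v : Option (List Char)) i =>
        match v, PySem.List.pyGet? chaine.toList i with
        | some v, some ch => some (v ++ [ch])
        | _, _ => none)
      (some [])
    match v with
    | some v => v = motif.toList
    | none => false
  else false

-- ===== PORT B =====
def correspond_alt (motif : String) (chaine : String) (position : Int) : Bool :=
  PySem.Str.isIn motif chaine &&
    (PySem.List.pyRange 0 (PySem.List.len motif.toList) 1).all
      (fun k => PySem.List.pyGet? chaine.toList (position + k)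
                  == PySem.List.pyGet? motif.toList k)

-- ===== PRECONDITION & SPEC =====
-- Pre_ excludes exactly the inputs where Python A raises IndexError: motif occurs in chaine,
-- motif is nonempty, and some index in position..position+len(motif)-1 is out of range.
def Pre_correspond (motif : String) (chaine : String) (position : Int) : Prop :=
  PySem.Str.isIn motif chaine = true →
    (motif.toList.length = 0 ∨
      (-(chaine.toList.length : Int) ≤ position ∧
        position + motif.toList.length ≤ chaine.toList.length))
instance (motif : String) (chaine : String) (position : Int) : Decidable (Pre_correspond motif chaine position) := by unfold Pre_correspond; infer_instance

def pvWitness_correspond : String × String × Int := ("ab", "xaby", 1)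

def Spec_correspond (motif : String) (chaine : String) (position : Int) (out : Bool) : Prop := out = correspond_alt motif chaine position
instance (motif : String) (chaine : String) (position : Int) (out : Bool) : Decidable (Spec_correspond motif chaine position out) := by unfold Spec_correspond; infer_instance

-- ===== CLAIM (what is proved, stated in full; the proofs are below) =====
def Claim_equal_correspond : Prop := ∀ (motif : String) (chaine : String) (position : Int), Dom_correspond motif chaine position → Pre_correspond motif chaine position → Spec_correspond motif chaine position (correspond motif chaine position)

-- ===== LEMMAS AND PROOFS =====

-- range(a, a+n) as a mapped List.range
theorem pvRange_add_natCast (a : Int) (n : Nat) :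
    PySem.List.pyRange a (a + n) = (List.range n).map (fun (k : Nat) => a + (k:Int)) := by
  induction n with
  | zero => simp [PySem.List.pyRange]
  | succ n ih =>
    rw [show a + ((n+1:Nat):Int) = (a + n) + 1 by push_cast; ring,
        PySem.List.pyRange_one_succ_right (by omega)]
    simp [List.range_succ, ih]

-- the window A's inner loop collects, as a slice of chaine
theorem pvWindowEq (c m : List Char) (k : Nat) (hk : k + m.length ≤ c.length) :
    (PySem.List.pyRange (k:Int) ((k:Int) + PySem.List.len m)).map
        (fun y => PySem.List.pyGetD c y ' ')
      = (c.drop k).take m.length := by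
  rw [PySem.List.len_eq, pvRange_add_natCast]
  apply List.ext_getElem
  · simp; omega
  · intro j h1 h2
    simp only [List.getElem_map, List.getElem_range, List.getElem_take, List.getElem_drop]
    have hj : j < m.length := by simpa using h1
    have hc : ((k:Int) + (j:Int)) = ((k + j : Nat) : Int) := by push_cast; ring
    rw [hc, PySem.List.pyGetD_natCast, List.getD_eq_getElem _ _ (by omega)]

-- the body of A's outer loop
def pvStep (m c : List Char) (vg : List Char × Bool) (i : Int) : List Char × Bool :=
  let v := (PySem.List.pyRange i (i + PySem.List.len m)).foldl
    (fun v y => v ++ [PySem.List.pyGetD c y ' ']) vg.1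
  if v = m then (v, true) else ([], vg.2)

-- g never drops back to false
theorem pvStep_mono (m c : List Char) (r : List Int) (v0 : List Char) :
    (r.foldl (pvStep m c) (v0, true)).2 = true := by
  induction r generalizing v0 with
  | nil => rfl
  | cons i r ih =>
    simp only [List.foldl, pvStep]
    split <;> exact ih _

-- A's outer loop computes: does any window equal motif?
theorem pvFold_any (m c : List Char) (r : List Int) (g : Bool) :
    (r.foldl (pvStep m c) ([], g)).2
      = (g || r.any (fun i =>
          decide ((PySem.List.pyRange i (i + PySem.List.len m)).map
            (fun y => PySem.List.pyGetD c y ' ') = m))) := by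
  induction r generalizing g with
  | nil => simp
  | cons i r ih =>
    have hstep : pvStep m c ([], g) i
        = (if h : (PySem.List.pyRange i (i + PySem.List.len m)).map
              (fun y => PySem.List.pyGetD c y ' ') = m
           then ((PySem.List.pyRange i (i + PySem.List.len m)).map
              (fun y => PySem.List.pyGetD c y ' '), true) else ([], g)) := by
      simp only [pvStep]
      rw [PySem.List.foldl_append_singleton_eq_map, List.nil_append]
      split <;> rfl
    simp only [List.foldl, List.any_cons, hstep]
    split
    · next h => rw [pvStep_mono, decide_eq_true h]; simp
    · next h => rw [ih, decide_eq_false h]; simp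

-- A's est_inclus is the substring test
theorem est_inclus_eq_isIn (motif chaine : String) :
    est_inclus motif chaine = PySem.Str.isIn motif chaine := by
  have hdef : est_inclus motif chaine
      = ((PySem.List.pyRange 0 (PySem.List.len chaine.toList - PySem.List.len motif.toList + 1)).foldl
          (pvStep motif.toList chaine.toList) ([], false)).2 := rfl
  rw [hdef, pvFold_any, PySem.Str.isIn_eq, Bool.false_or, Bool.eq_iff_iff,
      List.any_eq_true, ← PySem.Chars.exists_prefix_drop_iff_isIn]
  set m := motif.toList
  set c := chaine.toList
  constructor
  · rintro ⟨i, hmem, hdec⟩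
    rw [PySem.List.mem_pyRange_one] at hmem
    rw [PySem.List.len_eq, PySem.List.len_eq] at hmem
    have hk : i = ((i.toNat : Nat) : Int) := by omega
    refine ⟨i.toNat, ?_⟩
    rw [List.prefix_iff_eq_take]
    have hb : i.toNat + m.length ≤ c.length := by omega
    rw [decide_eq_true_eq, hk, pvWindowEq c m i.toNat hb] at hdec
    exact hdec.symm
  · rintro ⟨j, hj⟩
    have hlen := hj.length_le
    rw [List.length_drop] at hlen
    by_cases hm : m.length = 0
    · refine ⟨0, ?_, ?_⟩
      · rw [PySem.List.mem_pyRange_one, PySem.List.len_eq, PySem.List.len_eq]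
        omega
      · rw [decide_eq_true_eq, show (0:Int) = ((0:Nat):Int) from rfl,
            pvWindowEq c m 0 (by omega)]
        rw [List.eq_nil_of_length_eq_zero hm]
        simp
    · have hjn : j + m.length ≤ c.length := by omega
      refine ⟨(j : Int), ?_, ?_⟩
      · rw [PySem.List.mem_pyRange_one, PySem.List.len_eq, PySem.List.len_eq]
        omega
      · rw [decide_eq_true_eq, pvWindowEq c m j hjn]
        rw [List.prefix_iff_eq_take] at hj
        exact hj.symm

-- A's index loop in correspond, when no index raises
theorem pvFoldA (c : List Char) (r : List Int) (acc : List Char)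
    (h : ∀ y ∈ r, PySem.List.pyGet? c y ≠ none) :
    r.foldl (fun (v : Option (List Char)) i =>
        match v, PySem.List.pyGet? c i with
        | some v, some ch => some (v ++ [ch])
        | _, _ => none) (some acc)
      = some (acc ++ r.map (fun y => PySem.List.pyGetD c y ' ')) := by
  induction r generalizing acc with
  | nil => simp
  | cons y r ih =>
    obtain ⟨ch, hch⟩ := Option.ne_none_iff_exists'.mp (h y (by simp))
    have hg : PySem.List.pyGetD c y ' ' = ch := by simp [PySem.List.pyGetD, hch]
    simp only [List.foldl, List.map_cons, hch, hg]
    rw [ih _ (fun z hz => h z (by simp [hz]))]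
    simp

-- map over List.range equals a list iff it agrees pointwise
theorem pvMapRangeEq {α : Type} (g : Nat → α) (n : Nat) (m : List α) (hn : m.length = n) :
    ((List.range n).map g = m) ↔ ∀ k, (h : k < n) → g k = m[k] := by
  subst hn
  constructor
  · intro h k hk
    have := congrArg (fun l => l[k]?) h
    simpa [hk, List.getElem?_eq_getElem] using this
  · intro h
    apply List.ext_getElem (by simp)
    intro k h1 h2
    simpa using h k (by simpa using h1)

-- A's built-string comparison equals B's per-character check (bounds from Pre_)
theorem pvPointwise (c m : List Char) (p : Int)
    (h1 : -(c.length:Int) ≤ p) (h2 : p + m.length ≤ c.length) :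
    decide (((PySem.List.pyRange p (p + PySem.List.len m)).map
        (fun y => PySem.List.pyGetD c y ' ')) = m)
    = (PySem.List.pyRange 0 (PySem.List.len m)).all
        (fun k => PySem.List.pyGet? c (p + k) == PySem.List.pyGet? m k) := by
  have key : ∀ (k : Nat) (hk : k < m.length),
      ((PySem.List.pyGet? c (p + (k:Int)) == PySem.List.pyGet? m (k:Int)) = true)
        ↔ (PySem.List.pyGetD c (p + (k:Int)) ' ' = m[k]) := by
    intro k hk
    have hnn : PySem.List.pyGet? c (p + (k:Int)) ≠ none := by
      rw [Ne, PySem.List.pyGet?_eq_none_iff, not_not]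
      simp only [PySem.Raise.InRange]
      omega
    obtain ⟨ch, hch⟩ := Option.ne_none_iff_exists'.mp hnn
    have hg : PySem.List.pyGetD c (p + (k:Int)) ' ' = ch := by
      simp [PySem.List.pyGetD, hch]
    rw [hch, hg, PySem.List.pyGet?_natCast, List.getElem?_eq_getElem hk]
    simp
  rw [PySem.List.len_eq, pvRange_add_natCast, PySem.List.pyRange_zero_natCast,
      List.map_map, List.all_map, Bool.eq_iff_iff, decide_eq_true_eq,
      pvMapRangeEq _ _ m rfl, List.all_eq_true]
  constructor
  · intro h k hkmem
    have hklt : k < m.length := List.mem_range.mp hkmem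
    simpa using (key k hklt).mpr (h k hklt)
  · intro h k hklt
    exact (key k hklt).mp (by simpa using h k (List.mem_range.mpr hklt))

-- the equivalence, assembled
theorem pvMain (motif chaine : String) (position : Int)
    (hpre : Pre_correspond motif chaine position) :
    correspond motif chaine position = correspond_alt motif chaine position := by
  unfold Pre_correspond at hpre
  unfold correspond correspond_alt
  rw [est_inclus_eq_isIn]
  by_cases h : PySem.Str.isIn motif chaine = true
  · rw [if_pos h, h, Bool.true_and]
    rcases hpre h with hm0 | ⟨hb1, hb2⟩
    · have hm : motif.toList = [] := List.eq_nil_of_length_eq_zero hm0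
      simp [hm, PySem.List.pyRange]
    · rw [pvFoldA _ _ _ ?_]
      · simp only [List.nil_append]
        exact pvPointwise chaine.toList motif.toList position hb1 hb2
      · intro y hy
        rw [PySem.List.mem_pyRange_one] at hy
        rw [PySem.List.len_eq] at hy
        rw [Ne, PySem.List.pyGet?_eq_none_iff, not_not]
        simp only [PySem.Raise.InRange]
        omega
  · rw [if_neg h]
    rw [Bool.not_eq_true] at h
    rw [h, Bool.false_and]

-- ===== VERDICT (by name: the statement is the Claim_ definition above) =====
theorem correspond_spec : Claim_equal_correspond := by
  intro motif chaine position _ hpre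
  exact pvMain motif chaine position hpre
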